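-- pv_equiv track=rewrite | github.com/poojapatelgr/LVM- | leaveman/forms.py | get_reason_choices
-- ===== SOURCE A (Python) =====
-- def get_reason_choices(choices, gender, role, remainingpl, remainingsl, ml):
--     nchoices = choices
--     if gender == 'M' or role:
--         nchoices = [x for x in nchoices if x[0] != 'MATER']
--     if gender == 'F' or role:
--         nchoices = [x for x in nchoices if x[0] != 'PATER']
--
--     if remainingpl > 0:
--         nchoices = [x for x in nchoices if x[0] != 'LOPFD']
--         nchoices = [x for x in nchoices if x[0] != 'LOPHD']
--
--     if remainingpl <= 0:
--         nchoices = [x for x in nchoices if x[0] != 'PERFD']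
--         nchoices = [x for x in nchoices if x[0] != 'PERHD']
--
--     if remainingsl <= 0:
--         nchoices = [x for x in nchoices if x[0] != 'SICFD']
--         nchoices = [x for x in nchoices if x[0] != 'SICHD']
--
--     if ml:
--         nchoices = [x for x in nchoices if x[0] != 'MARRY']
--
--     return nchoices
-- ===== SOURCE B (Python) =====
-- def get_reason_choices(choices, gender, role, remainingpl, remainingsl, ml):
--     excluded = set()
--     if gender == 'M' or role:
--         excluded.add('MATER')
--     if gender == 'F' or role:
--         excluded.add('PATER')
--     if remainingpl > 0:
--         excluded.update(('LOPFD', 'LOPHD'))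
--     if remainingpl <= 0:
--         excluded.update(('PERFD', 'PERHD'))
--     if remainingsl <= 0:
--         excluded.update(('SICFD', 'SICHD'))
--     if ml:
--         excluded.add('MARRY')
--     return [x for x in choices if x[0] not in excluded]
-- ===== Notes on version B (the rewrite author's own statement) =====
-- stated objective: simpler
-- what changed: Replaces the chain of nine conditional list comprehensions (repeated scans of the list) with a set of excluded keys built once from the same guards plus a single filtering pass over choices.
import Mathlib
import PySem

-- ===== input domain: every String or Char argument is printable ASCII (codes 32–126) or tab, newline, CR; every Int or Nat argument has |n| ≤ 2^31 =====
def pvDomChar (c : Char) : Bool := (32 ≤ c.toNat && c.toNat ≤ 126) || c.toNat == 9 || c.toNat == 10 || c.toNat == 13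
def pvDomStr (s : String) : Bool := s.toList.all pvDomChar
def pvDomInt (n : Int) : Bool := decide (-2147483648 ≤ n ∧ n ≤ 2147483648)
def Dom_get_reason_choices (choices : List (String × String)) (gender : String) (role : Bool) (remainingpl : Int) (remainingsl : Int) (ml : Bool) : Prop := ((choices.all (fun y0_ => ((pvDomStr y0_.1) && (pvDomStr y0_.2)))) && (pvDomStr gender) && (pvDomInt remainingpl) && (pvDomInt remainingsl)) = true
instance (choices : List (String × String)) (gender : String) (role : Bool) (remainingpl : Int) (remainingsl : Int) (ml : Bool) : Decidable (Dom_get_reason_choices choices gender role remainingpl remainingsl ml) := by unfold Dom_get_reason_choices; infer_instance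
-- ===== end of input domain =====

-- B builds one set of excluded reason keys from the same guards and filters choices in a single pass, for simplicity.


-- ===== PORT A =====
def get_reason_choices (choices : List (String × String)) (gender : String) (role : Bool) (remainingpl : Int) (remainingsl : Int) (ml : Bool) : List (String × String) :=
  let nchoices := choices
  let nchoices := if gender == "M" || role then nchoices.filter (fun x => x.1 != "MATER") else nchoices
  let nchoices := if gender == "F" || role then nchoices.filter (fun x => x.1 != "PATER") else nchoices
  let nchoices := if remainingpl > 0 then
      (nchoices.filter (fun x => x.1 != "LOPFD")).filter (fun x => x.1 != "LOPHD")
    else nchoices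
  let nchoices := if remainingpl ≤ 0 then
      (nchoices.filter (fun x => x.1 != "PERFD")).filter (fun x => x.1 != "PERHD")
    else nchoices
  let nchoices := if remainingsl ≤ 0 then
      (nchoices.filter (fun x => x.1 != "SICFD")).filter (fun x => x.1 != "SICHD")
    else nchoices
  let nchoices := if ml then nchoices.filter (fun x => x.1 != "MARRY") else nchoices
  nchoices

-- ===== PORT B =====
def get_reason_choices_alt (choices : List (String × String)) (gender : String) (role : Bool) (remainingpl : Int) (remainingsl : Int) (ml : Bool) : List (String × String) :=
  let excluded : PySem.Set String := PySem.Set.empty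
  let excluded := if gender == "M" || role then PySem.Set.add excluded "MATER" else excluded
  let excluded := if gender == "F" || role then PySem.Set.add excluded "PATER" else excluded
  let excluded := if remainingpl > 0 then PySem.Set.update excluded ["LOPFD", "LOPHD"] else excluded
  let excluded := if remainingpl ≤ 0 then PySem.Set.update excluded ["PERFD", "PERHD"] else excluded
  let excluded := if remainingsl ≤ 0 then PySem.Set.update excluded ["SICFD", "SICHD"] else excluded
  let excluded := if ml then PySem.Set.add excluded "MARRY" else excluded
  choices.filter (fun x => !(PySem.Set.contains excluded x.1))

-- ===== PRECONDITION & SPEC =====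
def Spec_get_reason_choices (choices : List (String × String)) (gender : String) (role : Bool) (remainingpl : Int) (remainingsl : Int) (ml : Bool) (out : List (String × String)) : Prop := out = get_reason_choices_alt choices gender role remainingpl remainingsl ml
instance (choices : List (String × String)) (gender : String) (role : Bool) (remainingpl : Int) (remainingsl : Int) (ml : Bool) (out : List (String × String)) : Decidable (Spec_get_reason_choices choices gender role remainingpl remainingsl ml out) := by unfold Spec_get_reason_choices; infer_instance

-- ===== CLAIM (what is proved, stated in full; the proofs are below) =====
def Claim_equal_get_reason_choices : Prop := ∀ (choices : List (String × String)) (gender : String) (role : Bool) (remainingpl : Int) (remainingsl : Int) (ml : Bool), Dom_get_reason_choices choices gender role remainingpl remainingsl ml → Spec_get_reason_choices choices gender role remainingpl remainingsl ml (get_reason_choices choices gender role remainingpl remainingsl ml)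

-- ===== LEMMAS AND PROOFS =====
lemma grc_master (l : List (String × String)) (c1 c2 c3 c4 c5 c6 : Prop)
    [Decidable c1] [Decidable c2] [Decidable c3] [Decidable c4] [Decidable c5] [Decidable c6] :
    (let n := l
     let n := if c1 then n.filter (fun x => x.1 != "MATER") else n
     let n := if c2 then n.filter (fun x => x.1 != "PATER") else n
     let n := if c3 then (n.filter (fun x => x.1 != "LOPFD")).filter (fun x => x.1 != "LOPHD") else n
     let n := if c4 then (n.filter (fun x => x.1 != "PERFD")).filter (fun x => x.1 != "PERHD") else n
     let n := if c5 then (n.filter (fun x => x.1 != "SICFD")).filter (fun x => x.1 != "SICHD") else n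
     let n := if c6 then n.filter (fun x => x.1 != "MARRY") else n
     n) =
    (let e : PySem.Set String := PySem.Set.empty
     let e := if c1 then PySem.Set.add e "MATER" else e
     let e := if c2 then PySem.Set.add e "PATER" else e
     let e := if c3 then PySem.Set.update e ["LOPFD", "LOPHD"] else e
     let e := if c4 then PySem.Set.update e ["PERFD", "PERHD"] else e
     let e := if c5 then PySem.Set.update e ["SICFD", "SICHD"] else e
     let e := if c6 then PySem.Set.add e "MARRY" else e
     l.filter (fun x => !(PySem.Set.contains e x.1))) := by
  by_cases h1 : c1 <;> by_cases h2 : c2 <;> by_cases h3 : c3 <;>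
    by_cases h4 : c4 <;> by_cases h5 : c5 <;> by_cases h6 : c6 <;>
    (simp only [h1, h2, h3, h4, h5, h6, if_true, if_false, List.filter_filter]
     first
     | rfl
     | (simp [PySem.Set.empty, PySem.Set.contains]; done)
     | (refine List.filter_congr fun x _ => ?_
        simp [PySem.Set.empty, PySem.Set.add, PySem.Set.update, PySem.Set.contains,
          Bool.not_or, bne, beq_eq_decide]
        all_goals (first | rfl | ac_rfl)))

-- ===== VERDICT (by name: the statement is the Claim_ definition above) =====
theorem get_reason_choices_spec : Claim_equal_get_reason_choices := by
  intro choices gender role remainingpl remainingsl ml _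
  unfold Spec_get_reason_choices get_reason_choices get_reason_choices_alt
  exact grc_master choices _ _ _ _ _ _
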